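-- pv_equiv track=rewrite | github.com/yenniechoi/Python_study | Programmers_Basic/day_15.py | compare_50_x
-- ===== SOURCE A (Python) =====
-- def compare_50_x(arr):
--     # debugging & tracking states
--
--     all_result = [arr[:]]
--     i = 0
--     while True:
--         for j, n in enumerate(arr):
--             if n >= 50 and not n % 2:
--                 arr[j] = n // 2
--             elif n < 50 and n % 2:
--                 arr[j] = n * 2 + 1
--         all_result.append(arr[:])
--
--         if all_result[i] == all_result[i + 1]:
--             break
--         else:
--             i += 1
--     return i
-- ===== SOURCE B (Python) =====
-- def compare_50_x(arr):
--     # Per-element run-to-completion: elements evolve independently, so the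
--     # number of whole-array passes A counts equals the max per-element step
--     # count.  Mutates arr to its stabilized state, like the original.
--     best = 0
--     for j, n in enumerate(arr):
--         steps = 0
--         while True:
--             if n >= 50 and n % 2 == 0:
--                 m = n // 2
--             elif n < 50 and n % 2 == 1:
--                 m = n * 2 + 1
--             else:
--                 m = n
--             if m == n:
--                 break
--             n = m
--             steps += 1
--         arr[j] = n
--         best = max(best, steps)
--     return best
-- ===== Notes on version B (the rewrite author's own statement) =====
-- stated objective: alternative
-- what changed: Replaces A's repeated whole-array passes with snapshot lists and snapshot comparison by a single pass that runs each element independently to its fixpoint, returning the maximum per-element step count (elements evolve independently, so this equals A's pass count); avoids snapshot copies and repeated passes, though a timing run could not verify speed.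
import Mathlib
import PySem

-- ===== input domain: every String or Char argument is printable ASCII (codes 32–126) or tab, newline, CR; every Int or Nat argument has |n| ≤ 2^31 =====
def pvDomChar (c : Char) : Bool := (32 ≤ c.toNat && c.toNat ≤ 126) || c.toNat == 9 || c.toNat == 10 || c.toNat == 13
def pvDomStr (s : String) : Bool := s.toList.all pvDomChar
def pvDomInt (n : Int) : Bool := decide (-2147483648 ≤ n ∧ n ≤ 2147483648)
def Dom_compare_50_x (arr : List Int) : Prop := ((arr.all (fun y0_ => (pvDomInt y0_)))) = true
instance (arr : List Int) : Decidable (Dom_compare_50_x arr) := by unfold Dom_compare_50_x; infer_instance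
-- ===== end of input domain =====

-- B replaces A's pass-by-pass loop (with snapshot history) by a per-element run-to-fixpoint
-- loop returning the max step count (alternative decomposition: no snapshot
-- copies/compares, no repeated passes over already-stable elements).  Both Pythons mutate
-- arr in place to the stabilized state identically; the equivalence proved is about the
-- return value.  Both loops are ported with the same fuel (ample for the bounded domain,
-- where trajectories stabilize in < 40 steps; on the few inputs with an odd element < -1
-- both Pythons loop forever, so equality of the fueled ports covers every returning input).


-- fuel bounding both while-loops (Python's loops are unbounded; on the bounded domain every terminating
-- trajectory stabilizes well within 100 steps, so the fuel is never exhausted there)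
def pvFuel : Nat := 100

-- ===== PORT A =====
-- body of A's for-loop: each arr[j] is read and rewritten at its own index only,
-- so the in-place pass is the elementwise map of this step
def stepA (n : Int) : Int :=
  if n ≥ 50 ∧ PySem.Int.mod n 2 = 0 then PySem.Int.floordiv n 2
  else if n < 50 ∧ PySem.Int.mod n 2 ≠ 0 then n * 2 + 1
  else n

-- A's while-loop, carrying the all_result snapshot list and i exactly as A does
def loopA : Nat → List (List Int) → List Int → Int → Int
  | 0, _, _, i => i
  | fuel+1, all_result, arr, i =>
    let arr' := arr.map stepA
    let all := all_result ++ [arr']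
    if PySem.List.pyGet? all i = PySem.List.pyGet? all (i + 1) then i
    else loopA fuel all arr' (i + 1)

def compare_50_x (arr : List Int) : Int := loopA pvFuel [arr] arr 0

-- ===== PORT B =====
def stepB (n : Int) : Int :=
  if n ≥ 50 ∧ PySem.Int.mod n 2 = 0 then PySem.Int.floordiv n 2
  else if n < 50 ∧ PySem.Int.mod n 2 = 1 then n * 2 + 1
  else n

-- B's inner while-loop: run one element to its fixpoint, counting changes
def altGo : Nat → Int → Int → Int
  | 0, _, steps => steps
  | fuel+1, n, steps =>
    let m := stepB n
    if m = n then steps else altGo fuel m (steps + 1)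

def compare_50_x_alt (arr : List Int) : Int :=
  arr.foldl (fun best n => max best (altGo pvFuel n 0)) 0

-- ===== PRECONDITION & SPEC =====
def Spec_compare_50_x (arr : List Int) (out : Int) : Prop := out = compare_50_x_alt arr
instance (arr : List Int) (out : Int) : Decidable (Spec_compare_50_x arr out) := by unfold Spec_compare_50_x; infer_instance

-- ===== CLAIM (what is proved, stated in full; the proofs are below) =====
def Claim_equal_compare_50_x : Prop := ∀ (arr : List Int), Dom_compare_50_x arr → Spec_compare_50_x arr (compare_50_x arr)

-- ===== LEMMAS AND PROOFS =====

theorem stepB_eq_stepA (n : Int) : stepB n = stepA n := by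
  unfold stepA stepB
  rcases PySem.Int.mod_two_eq n with h | h <;> simp [h]

-- simplified shape of A's loop, the snapshot bookkeeping removed
def loopS : Nat → List Int → Int → Int
  | 0, _, i => i
  | fuel+1, arr, i =>
    let arr' := arr.map stepA
    if arr' = arr then i else loopS fuel arr' (i + 1)

def maxL (l : List Int) : Int := l.foldl max 0

theorem altGo_shift (fuel : Nat) : ∀ (n c : Int), altGo fuel n c = c + altGo fuel n 0 := by
  induction fuel with
  | zero => intro n c; simp [altGo]
  | succ k ih =>
    intro n c
    simp only [altGo]
    by_cases h : stepB n = n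
    · simp [h]
    · simp only [h, if_false]
      rw [ih (stepB n) (c + 1), ih (stepB n) (0 + 1)]
      ring

theorem altGo_nonneg (fuel : Nat) : ∀ (n : Int), 0 ≤ altGo fuel n 0 := by
  induction fuel with
  | zero => intro n; simp [altGo]
  | succ k ih =>
    intro n
    simp only [altGo]
    by_cases h : stepB n = n
    · simp [h]
    · simp only [h, if_false]
      rw [altGo_shift]
      have := ih (stepB n)
      omega

theorem altGo_fixed (fuel : Nat) (n : Int) (h : stepA n = n) : altGo fuel n 0 = 0 := by
  cases fuel with
  | zero => simp [altGo]
  | succ k => simp [altGo, stepB_eq_stepA, h]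

theorem altGo_succ (k : Nat) (n : Int) :
    altGo (k + 1) n 0 = if stepA n = n then 0 else 1 + altGo k (stepA n) 0 := by
  simp only [altGo, stepB_eq_stepA]
  by_cases h : stepA n = n
  · simp [h]
  · simp only [h, if_false]
    rw [altGo_shift]
    ring

theorem foldl_max_eq (l : List Int) : ∀ (a : Int), 0 ≤ a → l.foldl max a = max a (maxL l) := by
  induction l with
  | nil => intro a _; simp [maxL]; omega
  | cons x t ih =>
    intro a ha
    have h1 := ih (max a x) (by omega)
    have h2 := ih (max 0 x) (by omega)
    simp only [List.foldl, maxL] at *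
    omega

theorem maxL_nonneg (l : List Int) : 0 ≤ maxL l := by
  cases l with
  | nil => simp [maxL]
  | cons x t =>
    have := foldl_max_eq t (max 0 x) (by omega)
    simp only [maxL, List.foldl] at *
    omega

theorem maxL_cons (x : Int) (l : List Int) : maxL (x :: l) = max x (maxL l) := by
  have h1 := foldl_max_eq l (max 0 x) (by omega)
  have h2 := maxL_nonneg l
  simp only [maxL, List.foldl] at *
  omega

theorem maxL_eq_zero (l : List Int) (h : ∀ x ∈ l, x = 0) : maxL l = 0 := by
  induction l with
  | nil => simp [maxL]
  | cons x t ih =>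
    rw [maxL_cons, h x (by simp), ih (fun y hy => h y (by simp [hy]))]
    omega

theorem map_stepA_eq_self (l : List Int) : l.map stepA = l ↔ ∀ n ∈ l, stepA n = n := by
  induction l with
  | nil => simp
  | cons x t ih =>
    constructor
    · intro h
      rw [List.map_cons, List.cons.injEq] at h
      intro n hn
      rcases List.mem_cons.1 hn with rfl | hn'
      · exact h.1
      · exact (ih.1 h.2) n hn'
    · intro h
      rw [List.map_cons, h x (by simp), ih.2 (fun n hn => h n (by simp [hn]))]

theorem maxL_fixed (k : Nat) (l : List Int) (h : ∀ n ∈ l, stepA n = n) :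
    maxL (l.map (fun n => altGo k n 0)) = 0 := by
  apply maxL_eq_zero
  intro x hx
  rcases List.mem_map.1 hx with ⟨n, hn, rfl⟩
  exact altGo_fixed k n (h n hn)

theorem maxL_key (k : Nat) : ∀ (arr : List Int), (∃ n ∈ arr, stepA n ≠ n) →
    maxL (arr.map (fun n => altGo (k + 1) n 0)) =
      1 + maxL ((arr.map stepA).map (fun n => altGo k n 0)) := by
  intro arr
  induction arr with
  | nil => rintro ⟨n, hn, _⟩; cases hn
  | cons x l ih =>
    intro h
    rw [List.map_cons, List.map_cons, List.map_cons, maxL_cons, maxL_cons, altGo_succ]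
    by_cases hx : stepA x = x
    · have hl : ∃ n ∈ l, stepA n ≠ n := by
        rcases h with ⟨n, hn, hne⟩
        rcases List.mem_cons.1 hn with rfl | hn'
        · exact absurd hx hne
        · exact ⟨n, hn', hne⟩
      rw [ih hl, hx, altGo_fixed k x hx]
      have := maxL_nonneg ((l.map stepA).map (fun n => altGo k n 0))
      simp only [if_true]
      omega
    · simp only [hx, if_false]
      have hux := altGo_nonneg k (stepA x)
      by_cases hl : ∃ n ∈ l, stepA n ≠ n
      · rw [ih hl]
        have := maxL_nonneg ((l.map stepA).map (fun n => altGo k n 0))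
        omega
      · push_neg at hl
        have h1 : maxL (l.map (fun n => altGo (k + 1) n 0)) = 0 := maxL_fixed (k + 1) l hl
        have h2 : maxL ((l.map stepA).map (fun n => altGo k n 0)) = 0 := by
          rw [(map_stepA_eq_self l).2 hl]; exact maxL_fixed k l hl
        rw [h1, h2]
        omega

theorem loopS_eq (fuel : Nat) : ∀ (arr : List Int) (i : Int),
    loopS fuel arr i = i + maxL (arr.map (fun n => altGo fuel n 0)) := by
  induction fuel with
  | zero =>
    intro arr i
    have : maxL (arr.map (fun n => altGo 0 n 0)) = 0 := by
      apply maxL_eq_zero; intro x hx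
      rcases List.mem_map.1 hx with ⟨n, _, rfl⟩; simp [altGo]
    simp [loopS, this]
  | succ k ih =>
    intro arr i
    simp only [loopS]
    by_cases h : arr.map stepA = arr
    · have hall := (map_stepA_eq_self arr).1 h
      have : maxL (arr.map (fun n => altGo (k + 1) n 0)) = 0 := maxL_fixed (k + 1) arr hall
      simp [h, this]
    · have hex : ∃ n ∈ arr, stepA n ≠ n := by
        by_contra hc; push_neg at hc
        exact h ((map_stepA_eq_self arr).2 hc)
      simp only [h, if_false]
      rw [ih (arr.map stepA) (i + 1), maxL_key k arr hex]
      ring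

theorem loopA_eq_loopS (fuel : Nat) : ∀ (res : List (List Int)) (arr : List Int) (i : Int),
    0 ≤ i → res.length = i.toNat + 1 → res.getLast? = some arr →
    loopA fuel res arr i = loopS fuel arr i := by
  induction fuel with
  | zero => intro res arr i _ _ _; simp [loopA, loopS]
  | succ k ih =>
    intro res arr i hi hlen hlast
    simp only [loopA, loopS]
    have hnat : (i + 1).toNat = i.toNat + 1 := by omega
    have hget1 : PySem.List.pyGet? (res ++ [arr.map stepA]) i = some arr := by
      rw [PySem.List.pyGet?_of_nonneg _ hi]
      rw [List.getElem?_append_left (by omega)]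
      rw [List.getLast?_eq_getElem?] at hlast
      have : res.length - 1 = i.toNat := by omega
      rwa [this] at hlast
    have hget2 : PySem.List.pyGet? (res ++ [arr.map stepA]) (i + 1) = some (arr.map stepA) := by
      rw [PySem.List.pyGet?_of_nonneg _ (show (0:Int) ≤ i + 1 by omega), hnat, ← hlen]
      rw [List.getElem?_append_right (by omega)]
      simp
    rw [hget1, hget2]
    by_cases h : arr.map stepA = arr
    · simp [h]
    · have hne : ¬ (some arr = some (arr.map stepA)) := by
        simp; intro hc; exact h hc.symm
      simp only [hne, if_false, h]
      exact ih (res ++ [arr.map stepA]) (arr.map stepA) (i + 1) (by omega)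
        (by simp [hlen]; omega) (by simp)

theorem alt_eq_maxL (arr : List Int) :
    compare_50_x_alt arr = maxL (arr.map (fun n => altGo pvFuel n 0)) := by
  rw [compare_50_x_alt, maxL, List.foldl_map]

-- ===== VERDICT (by name: the statement is the Claim_ definition above) =====
theorem compare_50_x_spec : Claim_equal_compare_50_x := by
  intro arr _
  show compare_50_x arr = compare_50_x_alt arr
  rw [compare_50_x, loopA_eq_loopS pvFuel [arr] arr 0 (by omega) (by simp) (by simp),
    loopS_eq, alt_eq_maxL]
  omega
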